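-- pv_equiv track=rewrite | github.com/mikey2002m/fondamenti-di-programmazione | Laboratorio/20221019/esercizi04.py | is_sorted_half
-- ===== SOURCE A (Python) =====
-- def is_sorted_half(a: list) -> bool:
--     changed = False
--     verso = 0
--     for i in range(len(a)-1):
--         if verso == 0:
--             if a[i] > a[i+1]:
--                 verso = 2
--             if a[i] < a[i + 1]:
--                 verso = 1
--         elif verso == 1:
--             if not changed:
--                 if a[i] > a[i+1]:
--                     changed = True
--                     verso = 2
--             else:
--                 if a[i] > a[i+1]:
--                     return False
--         elif verso == 2:
--             if not changed:
--                 if a[i] < a[i+1]: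
--                     changed = True
--                     verso = 2
--             else:
--                 if a[i] < a[i+1]:
--                     return False
--     return changed
-- ===== SOURCE B (Python) =====
-- def is_sorted_half(a: list) -> bool:
--     s = [1 if x < y else -1 for x, y in zip(a, a[1:]) if x != y]
--     if not s:
--         return False
--     if s[0] == 1:
--         if -1 not in s:
--             return False
--         return 1 not in s[s.index(-1):]
--     return s.count(1) == 1
-- ===== Notes on version B (the rewrite author's own statement) =====
-- stated objective: alternative
-- what changed: Replaces A's inline changed/verso state machine by a build-then-classify decomposition: one pass collects the nonzero adjacent-comparison signs, then the sign list is classified (+ first: a decrease exists and no increase after the first decrease; - first: exactly one increase).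
import Mathlib
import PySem

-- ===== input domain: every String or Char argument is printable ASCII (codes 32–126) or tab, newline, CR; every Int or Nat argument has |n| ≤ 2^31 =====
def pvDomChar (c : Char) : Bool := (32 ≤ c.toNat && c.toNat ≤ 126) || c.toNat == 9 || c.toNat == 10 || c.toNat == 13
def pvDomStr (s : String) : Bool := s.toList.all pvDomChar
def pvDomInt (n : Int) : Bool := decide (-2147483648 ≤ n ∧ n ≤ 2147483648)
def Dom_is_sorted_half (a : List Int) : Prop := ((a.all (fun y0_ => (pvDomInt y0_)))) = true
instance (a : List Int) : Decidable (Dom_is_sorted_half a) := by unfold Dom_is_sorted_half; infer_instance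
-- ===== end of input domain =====

-- B replaces A's inline changed/verso state machine by a build-signs-then-classify decomposition (alternative; same O(n) cost).

-- ===== PORT A =====
-- Literal transliteration of A: the for-loop over i with state (changed, verso)
-- becomes structural recursion over adjacent pairs with the same state and branch order.
def isHalfLoop : List Int → Bool → Int → Bool
  | x :: y :: rest, changed, verso =>
    if verso = 0 then
      let verso := if x > y then 2 else verso
      let verso := if x < y then 1 else verso
      isHalfLoop (y :: rest) changed verso
    else if verso = 1 then
      if !changed then
        if x > y then isHalfLoop (y :: rest) true 2
        else isHalfLoop (y :: rest) changed verso
      else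
        if x > y then false
        else isHalfLoop (y :: rest) changed verso
    else if verso = 2 then
      if !changed then
        if x < y then isHalfLoop (y :: rest) true 2
        else isHalfLoop (y :: rest) changed verso
      else
        if x < y then false
        else isHalfLoop (y :: rest) changed verso
    else isHalfLoop (y :: rest) changed verso
  | _, changed, _ => changed

def is_sorted_half (a : List Int) : Bool := isHalfLoop a false 0

-- ===== PORT B =====
-- Transliteration of Source B: build the list of nonzero adjacent-comparison signs, then classify it.
def pvSigns (a : List Int) : List Int :=
  (a.zip (a.drop 1)).filterMap (fun p => if p.1 ≠ p.2 then some (if p.1 < p.2 then 1 else -1) else none)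

def is_sorted_half_alt (a : List Int) : Bool :=
  let s := pvSigns a
  match s with
  | [] => false
  | h :: _ =>
    if h = 1 then
      if !(s.contains (-1)) then false
      else
        match PySem.List.index? s (-1) with
        | some j => !((s.drop j).contains 1)
        | none => false
    else (s.count 1 == 1)
-- ===== PRECONDITION & SPEC =====
def Spec_is_sorted_half (a : List Int) (out : Bool) : Prop := out = is_sorted_half_alt a
instance (a : List Int) (out : Bool) : Decidable (Spec_is_sorted_half a out) := by unfold Spec_is_sorted_half; infer_instance

-- ===== CLAIM (what is proved, stated in full; the proofs are below) =====
def Claim_equal_is_sorted_half : Prop := ∀ (a : List Int), Dom_is_sorted_half a → Spec_is_sorted_half a (is_sorted_half a)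

-- ===== LEMMAS AND PROOFS =====

theorem pvSigns_nil : pvSigns [] = [] := rfl
theorem pvSigns_single (x : Int) : pvSigns [x] = [] := rfl
theorem pvSigns_cons (x y : Int) (rest : List Int) :
    pvSigns (x :: y :: rest) =
      if x ≠ y then (if x < y then 1 else -1) :: pvSigns (y :: rest) else pvSigns (y :: rest) := by
  simp [pvSigns, List.filterMap_cons]
  split_ifs <;> simp

-- the "+ first" branch of B as a standalone function on sign lists
def pvBplus (s : List Int) : Bool :=
  if !(s.contains (-1)) then false
  else
    match PySem.List.index? s (-1) with
    | some j => !((s.drop j).contains 1)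
    | none => false

theorem pvBplus_cons_one (t : List Int) : pvBplus ((1 : Int) :: t) = pvBplus t := by
  rw [pvBplus, pvBplus, PySem.List.index?_cons_of_ne t (by decide : (1:Int) ≠ -1)]
  cases hj : PySem.List.index? t (-1) with
  | none =>
    have h : (-1 : Int) ∉ t := (PySem.List.index?_eq_none_iff t (-1)).mp hj
    simp [h]
  | some j =>
    have h : (-1 : Int) ∈ t := by
      rw [← PySem.List.index?_isSome_iff t (-1), hj]; rfl
    simp [h, List.drop_succ_cons]

theorem pvBplus_cons_neg (t : List Int) : pvBplus ((-1 : Int) :: t) = !(t.contains 1) := by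
  rw [pvBplus, PySem.List.index?_cons_self (-1 : Int) t]
  simp

-- changed = true, verso = 2: A returns true iff no further increase
theorem loop_true_two (l : List Int) : isHalfLoop l true 2 = !((pvSigns l).contains 1) := by
  induction l with
  | nil => simp [isHalfLoop, pvSigns_nil]
  | cons x t ih =>
    cases t with
    | nil => simp [isHalfLoop, pvSigns_single]
    | cons y rest =>
      rw [pvSigns_cons]
      rcases lt_trichotomy x y with h | h | h
      · simp [isHalfLoop, h, ne_of_lt h]
      · simp [isHalfLoop, h, ih]
      · simp [isHalfLoop, not_lt.mpr h.le, ne_of_gt h, ih]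

-- changed = false, verso = 2 (decrease seen first): true iff exactly one increase
theorem loop_false_two (l : List Int) : isHalfLoop l false 2 = ((pvSigns l).count 1 == 1) := by
  induction l with
  | nil => simp [isHalfLoop, pvSigns_nil]
  | cons x t ih =>
    cases t with
    | nil => simp [isHalfLoop, pvSigns_single]
    | cons y rest =>
      rw [pvSigns_cons]
      rcases lt_trichotomy x y with h | h | h
      · rw [show isHalfLoop (x :: y :: rest) false 2 = isHalfLoop (y :: rest) true 2 by
          simp [isHalfLoop, h], loop_true_two]
        simp [ne_of_lt h, List.count_cons]
        by_cases hc : (1 : Int) ∈ pvSigns (y :: rest)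
        · have := List.count_pos_iff.mpr hc
          simp [hc, h]; omega
        · have := List.count_eq_zero.mpr hc
          simp [hc, h]; omega
      · simp [isHalfLoop, h, ih]
      · simp [isHalfLoop, not_lt.mpr h.le, ne_of_gt h, ih]

-- changed = false, verso = 1 (increase seen first)
theorem loop_false_one (l : List Int) : isHalfLoop l false 1 = pvBplus (pvSigns l) := by
  induction l with
  | nil => simp [isHalfLoop, pvSigns_nil, pvBplus]
  | cons x t ih =>
    cases t with
    | nil => simp [isHalfLoop, pvSigns_single, pvBplus]
    | cons y rest =>
      rw [pvSigns_cons]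
      rcases lt_trichotomy x y with h | h | h
      · simp [isHalfLoop, h, not_lt.mpr h.le, ne_of_lt h, ih, pvBplus_cons_one]
      · simp [isHalfLoop, h, ih]
      · simp [isHalfLoop, h, not_lt.mpr h.le, ne_of_gt h, pvBplus_cons_neg, loop_true_two]

theorem loop_main (l : List Int) : isHalfLoop l false 0 = is_sorted_half_alt l := by
  induction l with
  | nil => simp [isHalfLoop, is_sorted_half_alt, pvSigns_nil]
  | cons x t ih =>
    cases t with
    | nil => simp [isHalfLoop, is_sorted_half_alt, pvSigns_single]
    | cons y rest =>
      rcases lt_trichotomy x y with h | h | h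
      · rw [show isHalfLoop (x :: y :: rest) false 0 = isHalfLoop (y :: rest) false 1 by
          simp [isHalfLoop, h], loop_false_one]
        rw [show is_sorted_half_alt (x :: y :: rest) = pvBplus ((1:Int) :: pvSigns (y :: rest)) by
          simp only [is_sorted_half_alt, pvSigns_cons]
          simp [ne_of_lt h, h, pvBplus], pvBplus_cons_one]
      · have : isHalfLoop (x :: y :: rest) false 0 = isHalfLoop (y :: rest) false 0 := by
          simp [isHalfLoop, h]
        rw [this, ih]
        simp only [is_sorted_half_alt]
        rw [pvSigns_cons]
        simp [h]
      · rw [show isHalfLoop (x :: y :: rest) false 0 = isHalfLoop (y :: rest) false 2 by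
          simp [isHalfLoop, h, not_lt.mpr h.le], loop_false_two]
        simp only [is_sorted_half_alt, pvSigns_cons]
        simp [not_lt.mpr h.le, ne_of_gt h]

-- ===== VERDICT (by name: the statement is the Claim_ definition above) =====
theorem is_sorted_half_spec : Claim_equal_is_sorted_half := by
  intro a _
  unfold Spec_is_sorted_half is_sorted_half
  exact loop_main a
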